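-- pv_equiv track=rewrite | github.com/guilhermeomrizzi123/GridLamEdit | gridlamedit/services/laminate_reassociation.py | _build_contour_index
-- ===== SOURCE A (Python) =====
-- from typing import Dict, Iterable, List, Sequence, Tuple
--
-- MAX_CONTOUR_SIDES = 30
--
-- def _normalize_contour_token(value: object) -> str:
--     text = str(value or "").strip()
--     if not text:
--         return ""
--     return " ".join(text.split()).casefold()
--
-- def _contour_signature(values: Sequence[str]) -> Tuple[str, ...]:
--     normalized = [_normalize_contour_token(value) for value in values]
--     if len(normalized) > MAX_CONTOUR_SIDES:
--         normalized = normalized[:MAX_CONTOUR_SIDES]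
--     while normalized and not normalized[-1]:
--         normalized.pop()
--     return tuple(normalized)
--
-- def _build_contour_index(contours: Dict[str, Sequence[str]]) -> Dict[Tuple[str, ...], List[str]]:
--     index: Dict[Tuple[str, ...], List[str]] = {}
--     for cell_id, values in contours.items():
--         signature = _contour_signature(values)
--         if not any(signature):
--             continue
--         index.setdefault(signature, []).append(cell_id)
--     return index
-- ===== SOURCE B (Python) =====
-- from typing import Dict, List, Sequence, Tuple
--
-- MAX_CONTOUR_SIDES = 30
--
-- def _normalize_contour_token(value: object) -> str:
--     text = str(value or "").strip()
--     if not text: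
--         return ""
--     return " ".join(text.split()).casefold()
--
-- def _contour_signature(values: Sequence[str]) -> Tuple[str, ...]:
--     normalized = [_normalize_contour_token(value) for value in values]
--     if len(normalized) > MAX_CONTOUR_SIDES:
--         normalized = normalized[:MAX_CONTOUR_SIDES]
--     while normalized and not normalized[-1]:
--         normalized.pop()
--     return tuple(normalized)
--
-- def _build_contour_index(contours: Dict[str, Sequence[str]]) -> Dict[Tuple[str, ...], List[str]]:
--     # materialize (signature, cell_id) pairs, dedup signatures in first-occurrence
--     # order, then gather each group by a scan — no mutable dict upsert loop
--     pairs = [(sig, cell_id)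
--              for cell_id, values in contours.items()
--              for sig in (_contour_signature(values),)
--              if any(sig)]
--     order = dict.fromkeys(sig for sig, _ in pairs)
--     return {sig: [cid for s, cid in pairs if s == sig] for sig in order}
-- ===== Notes on version B (the rewrite author's own statement) =====
-- stated objective: alternative
-- what changed: Replaces A's single-pass dict setdefault/append upsert loop with a materialize-then-group pass: build a filtered (signature, cell_id) pair list, dedup signatures in first-occurrence order via dict.fromkeys, then gather each group's cell ids by a comprehension scan.
import Mathlib
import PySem

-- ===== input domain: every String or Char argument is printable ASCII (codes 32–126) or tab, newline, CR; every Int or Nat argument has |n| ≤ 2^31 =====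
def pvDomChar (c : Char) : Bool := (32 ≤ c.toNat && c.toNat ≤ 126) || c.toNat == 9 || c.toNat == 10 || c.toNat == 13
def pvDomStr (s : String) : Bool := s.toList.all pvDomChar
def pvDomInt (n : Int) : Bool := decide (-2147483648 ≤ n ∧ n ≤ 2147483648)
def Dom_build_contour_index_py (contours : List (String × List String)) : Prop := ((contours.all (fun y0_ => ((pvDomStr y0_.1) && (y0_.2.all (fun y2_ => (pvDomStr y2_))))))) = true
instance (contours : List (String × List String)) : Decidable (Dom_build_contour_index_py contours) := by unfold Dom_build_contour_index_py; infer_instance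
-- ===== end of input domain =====

-- B replaces A's single-pass dict-upsert loop by materialize-filter pairs, dedup the
-- signatures in first-occurrence order, then gather each group by a scan (objective:
-- alternative decomposition, same output).

-- ===== PORT A =====
-- shared helpers (B's Python keeps these two helper functions verbatim)
-- str.casefold() is ported as PySem.Str.lower: exact on the ASCII domain Dom_ admits
def nctPy (value : String) : String :=
  let t0 := if value = "" then "" else value   -- 'value or ""' on a string argument
  let text := PySem.Str.strip t0
  if text = "" then ""
  else PySem.Str.lower (PySem.Str.join " " (PySem.Str.split₀ text))

-- the 'while normalized and not normalized[-1]: normalized.pop()' loop: structural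
-- recursion removing the trailing run of empty strings
def popTrailingEmpty : List String → List String
  | [] => []
  | x :: xs =>
    match popTrailingEmpty xs with
    | [] => if x = "" then [] else [x]
    | ys => x :: ys

def csigPy (values : List String) : List String :=
  let normalized := values.map nctPy
  let normalized := if normalized.length > 30 then normalized.take 30 else normalized
  popTrailingEmpty normalized

def build_contour_index_py (contours : List (String × List String)) : List (List String × List String) :=
  (contours.foldl
    (fun (index : PySem.Dict (List String) (List String)) p =>
      -- signature = _contour_signature(values); if any(signature): setdefault+append
      if (csigPy p.2).any (fun s => !(s == "")) then
        index.modify (csigPy p.2) [] (· ++ [p.1])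
      else index)
    PySem.Dict.empty).items

-- ===== PORT B =====
def build_contour_index_py_alt (contours : List (String × List String)) : List (List String × List String) :=
  let pairs := (contours.map (fun p => (csigPy p.2, p.1))).filter
      (fun q => q.1.any (fun s => !(s == "")))
  let order := PySem.List.dedup (pairs.map (·.1))
  order.map (fun sig => (sig, (pairs.filter (fun q => q.1 == sig)).map (·.2)))

-- ===== PRECONDITION & SPEC =====
def Spec_build_contour_index_py (contours : List (String × List String)) (out : List (List String × List String)) : Prop := out = build_contour_index_py_alt contours
instance (contours : List (String × List String)) (out : List (List String × List String)) : Decidable (Spec_build_contour_index_py contours out) := by unfold Spec_build_contour_index_py; infer_instance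

-- ===== CLAIM (what is proved, stated in full; the proofs are below) =====
def Claim_equal_build_contour_index_py : Prop := ∀ (contours : List (String × List String)), Dom_build_contour_index_py contours → Spec_build_contour_index_py contours (build_contour_index_py contours)

-- ===== LEMMAS AND PROOFS =====

theorem build_ab_eq (contours : List (String × List String)) :
    build_contour_index_py contours = build_contour_index_py_alt contours := by
  unfold build_contour_index_py build_contour_index_py_alt
  have hfold : List.foldl
      (fun (index : PySem.Dict (List String) (List String)) (p : String × List String) =>
        if (csigPy p.2).any (fun s => !(s == "")) then
          index.modify (csigPy p.2) [] (· ++ [p.1])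
        else index)
      PySem.Dict.empty contours
    = List.foldl
      (fun (d : PySem.Dict (List String) (List String)) (q : List String × String) =>
        if q.1.any (fun s => !(s == "")) then d.modify q.1 [] (· ++ [q.2]) else d)
      PySem.Dict.empty (contours.map (fun p => (csigPy p.2, p.1))) := by
    rw [List.foldl_map]
  rw [hfold]
  rw [PySem.List.foldl_if_eq_foldl_filter
    (p := fun q : List String × String => q.1.any (fun s => !(s == "")))
    (f := fun (d : PySem.Dict (List String) (List String)) q => d.modify q.1 [] (· ++ [q.2]))]
  set ps := ((contours.map (fun p => (csigPy p.2, p.1))).filter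
      (fun q => q.1.any (fun s => !(s == "")))) with hps
  have hnd : (ps.foldl (fun (d : PySem.Dict (List String) (List String)) q =>
      d.modify q.1 [] (· ++ [q.2])) PySem.Dict.empty).keys.Nodup := by
    exact PySem.Dict.nodup_keys_foldl_modify_key ps (fun q => q.1) []
      (fun _ q => (· ++ [q.2])) PySem.Dict.empty PySem.Dict.nodup_keys_empty
  rw [PySem.Dict.items_eq_map_keys _ hnd []]
  have hkeys : (ps.foldl (fun (d : PySem.Dict (List String) (List String)) q =>
      d.modify q.1 [] (· ++ [q.2])) PySem.Dict.empty).keys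
      = PySem.Set.update PySem.Dict.empty.keys (ps.map (fun q => q.1)) :=
    PySem.Dict.keys_foldl_modify_key ps (fun q => q.1) [] (fun _ q => (· ++ [q.2]))
      PySem.Dict.empty
  rw [hkeys]
  have horder : PySem.Set.update (PySem.Dict.empty
      (κ := List String) (ν := List String)).keys (ps.map (fun q => q.1))
      = PySem.List.dedup (ps.map (·.1)) := by
    simp [PySem.Dict.keys_empty, PySem.Set.update, PySem.List.dedup_eq_ofList,
      PySem.Set.ofList_eq_foldl]
  rw [horder]
  apply List.map_congr_left
  intro k _
  rw [PySem.Dict.getD_foldl_modify_append, PySem.Dict.getD_empty]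
  simp

-- ===== VERDICT (by name: the statement is the Claim_ definition above) =====
theorem build_contour_index_py_spec : Claim_equal_build_contour_index_py := by
  intro contours _
  unfold Spec_build_contour_index_py
  exact build_ab_eq contours
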